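-- pv_equiv track=rewrite | github.com/datacommonsorg/data | scripts/us_census/acs5yr/subject_tables/common/common_util.py | column_to_be_ignored
-- ===== SOURCE A (Python) =====
-- def token_in_list_ignore_case(token: str, list_check: list) -> bool:
--     """Function that checks if the given token is in the list of tokens ignoring the case.
--
--     Args:
--       token: Token to be searched in the list.
--       list_check: List of tokens within which to search.
--
--     Returns:
--       Boolean value:
--         True if token is present in the list.
--         False if token is not present in the list.
--   """
--     cmp_token = token.lower()
--     for tok in list_check:
--         if tok.lower() == cmp_token:
--             return True
--     return False
--
-- def column_to_be_ignored(column_name: str,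
--                          spec_dict: dict,
--                          delimiter: str = '!!') -> bool:
--     """Function that checks if the given column is to be ignored according to the spec.
--     Column is considered to be ignored if there is a full match or if `ignoreColumns`
--       contains token which is present within the column name.
--
--     Args:
--       column_name: The column name string.
--       spec_dict: Dict obj containing configurations for the import.
--       delimiter: delimiter seperating tokens within single column name string.
--
--     Returns:
--       Boolean value:
--         True if the column is to be ignored accoring to the spec.
--         False if column is not to be ignored accoring to the spec.
--   """
--     ret_value = False
--     if 'ignoreColumns' in spec_dict:
--         for ignore_token in spec_dict['ignoreColumns']:
--             if delimiter in ignore_token and ignore_token.lower(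
--             ) == column_name.lower():
--                 ret_value = True
--             elif token_in_list_ignore_case(ignore_token,
--                                            column_name.split(delimiter)):
--                 ret_value = True
--     return ret_value
-- ===== SOURCE B (Python) =====
-- def column_to_be_ignored(column_name: str,
--                          spec_dict: dict,
--                          delimiter: str = '!!') -> bool:
--     if 'ignoreColumns' not in spec_dict:
--         return False
--     ignore_list = spec_dict['ignoreColumns']
--     full_specs = {t.lower() for t in ignore_list if delimiter in t}
--     token_specs = {t.lower() for t in ignore_list}
--     col_tokens = {p.lower() for p in column_name.split(delimiter)}
--     return column_name.lower() in full_specs or bool(col_tokens & token_specs)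
-- ===== Notes on version B (the rewrite author's own statement) =====
-- stated objective: simpler
-- what changed: Replaces A's nested scan (for each ignore token, linearly search the lowercased split tokens of the column) by building lowercased sets once (full-name specs, all specs, column tokens) and answering with one set membership plus one set intersection.
-- outside the precondition, e.g. on column_to_be_ignored('ab', {'ignoreColumns': []}, ''): A returns False, B raises ValueError; on column_to_be_ignored('ab', {'ignoreColumns': ['AB']}, ''): A returns True, B raises ValueError
import Mathlib
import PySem

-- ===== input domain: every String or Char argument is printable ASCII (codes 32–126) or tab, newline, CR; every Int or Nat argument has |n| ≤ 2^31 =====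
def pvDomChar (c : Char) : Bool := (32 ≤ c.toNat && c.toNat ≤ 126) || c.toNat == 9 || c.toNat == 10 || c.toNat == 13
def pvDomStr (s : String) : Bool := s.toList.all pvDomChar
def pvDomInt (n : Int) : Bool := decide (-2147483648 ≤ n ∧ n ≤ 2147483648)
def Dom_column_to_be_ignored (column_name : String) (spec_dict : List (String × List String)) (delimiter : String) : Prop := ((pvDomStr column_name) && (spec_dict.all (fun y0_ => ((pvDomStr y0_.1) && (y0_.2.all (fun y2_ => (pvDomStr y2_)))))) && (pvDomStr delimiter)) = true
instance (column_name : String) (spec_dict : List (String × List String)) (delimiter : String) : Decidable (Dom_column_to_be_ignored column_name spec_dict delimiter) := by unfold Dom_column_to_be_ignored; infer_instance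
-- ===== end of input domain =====

-- B builds lowercased sets once (full-name specs, all specs, column tokens) and answers with a
-- membership test plus a set intersection, instead of A's nested scan; return value only, no mutation.

-- ===== PORT A =====
-- helper: the early-return for-loop of token_in_list_ignore_case
def tilLoop (cmp_token : String) : List String → Bool
  | [] => false
  | tok :: rest => if PySem.Str.lower tok == cmp_token then true else tilLoop cmp_token rest

def token_in_list_ignore_case (token : String) (list_check : List String) : Bool :=
  tilLoop (PySem.Str.lower token) list_check

def column_to_be_ignored (column_name : String) (spec_dict : List (String × List String)) (delimiter : String) : Bool :=
  if PySem.Dict.contains (PySem.Dict.mk spec_dict) "ignoreColumns" then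
    (PySem.Dict.getD (PySem.Dict.mk spec_dict) "ignoreColumns" []).foldl
      (fun ret_value ignore_token =>
        if PySem.Str.isIn delimiter ignore_token
            && (PySem.Str.lower ignore_token == PySem.Str.lower column_name) then true
        else if token_in_list_ignore_case ignore_token
            ((PySem.Str.split? column_name delimiter).getD []) then true
        else ret_value)
      false
  else false

-- ===== PORT B =====
def column_to_be_ignored_alt (column_name : String) (spec_dict : List (String × List String)) (delimiter : String) : Bool :=
  if !(PySem.Dict.contains (PySem.Dict.mk spec_dict) "ignoreColumns") then false
  else
    let ignore_list := PySem.Dict.getD (PySem.Dict.mk spec_dict) "ignoreColumns" []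
    let full_specs : PySem.Set String :=
      PySem.Set.ofList ((ignore_list.filter (fun t => PySem.Str.isIn delimiter t)).map PySem.Str.lower)
    let token_specs : PySem.Set String :=
      PySem.Set.ofList (ignore_list.map PySem.Str.lower)
    let col_tokens : PySem.Set String :=
      PySem.Set.ofList (((PySem.Str.split? column_name delimiter).getD []).map PySem.Str.lower)
    PySem.Set.contains full_specs (PySem.Str.lower column_name)
      || !(PySem.Set.isdisjoint col_tokens token_specs)

-- ===== PRECONDITION & SPEC =====
-- Pre_ excludes the empty delimiter whenever the spec has an 'ignoreColumns' key: there Python's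
-- str.split('') raises ValueError (A itself raises unless every ignore token full-matches, and B always raises).
def Pre_column_to_be_ignored (column_name : String) (spec_dict : List (String × List String)) (delimiter : String) : Prop :=
  delimiter ≠ "" ∨ PySem.Dict.contains (PySem.Dict.mk spec_dict) "ignoreColumns" = false
instance (column_name : String) (spec_dict : List (String × List String)) (delimiter : String) : Decidable (Pre_column_to_be_ignored column_name spec_dict delimiter) := by unfold Pre_column_to_be_ignored; infer_instance

def pvWitness_column_to_be_ignored : String × (List (String × List String)) × String :=
  ("Total!!Population", [("ignoreColumns", ["population", "Margin!!of"])], "!!")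

def Spec_column_to_be_ignored (column_name : String) (spec_dict : List (String × List String)) (delimiter : String) (out : Bool) : Prop := out = column_to_be_ignored_alt column_name spec_dict delimiter
instance (column_name : String) (spec_dict : List (String × List String)) (delimiter : String) (out : Bool) : Decidable (Spec_column_to_be_ignored column_name spec_dict delimiter out) := by unfold Spec_column_to_be_ignored; infer_instance

-- ===== CLAIM (what is proved, stated in full; the proofs are below) =====
def Claim_equal_column_to_be_ignored : Prop := ∀ (column_name : String) (spec_dict : List (String × List String)) (delimiter : String), Dom_column_to_be_ignored column_name spec_dict delimiter → Pre_column_to_be_ignored column_name spec_dict delimiter → Spec_column_to_be_ignored column_name spec_dict delimiter (column_to_be_ignored column_name spec_dict delimiter)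

-- ===== LEMMAS AND PROOFS =====

-- the 'ret_value' loop of A sets the flag iff some token satisfies one of the two branch tests
theorem foldl_flag_eq_any (p q : String → Bool) (l : List String) (b : Bool) :
    l.foldl (fun ret tok => if p tok then true else if q tok then true else ret) b
      = (b || l.any (fun tok => p tok || q tok)) := by
  induction l generalizing b with
  | nil => simp
  | cons h t ih =>
      simp only [List.foldl_cons, List.any_cons, ih]
      by_cases hp : p h = true <;> by_cases hq : q h = true <;> simp [hp, hq]

theorem tilLoop_eq_any (cmp : String) (l : List String) :
    tilLoop cmp l = l.any (fun tok => PySem.Str.lower tok == cmp) := by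
  induction l with
  | nil => rfl
  | cons h t ih => by_cases hh : PySem.Str.lower h == cmp <;> simp [tilLoop, hh, ih]

theorem isdisjoint_false_iff (s t : PySem.Set String) :
    PySem.Set.isdisjoint s t = false ↔ ∃ x ∈ s, x ∈ t := by
  rw [← Bool.not_eq_true, PySem.Set.isdisjoint_iff]
  push Not
  simp

theorem column_to_be_ignored_spec : Claim_equal_column_to_be_ignored := by
  intro column_name spec_dict delimiter _hDom _hPre
  unfold Spec_column_to_be_ignored
  unfold column_to_be_ignored column_to_be_ignored_alt
  by_cases hkey : PySem.Dict.contains (PySem.Dict.mk spec_dict) "ignoreColumns" = true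
  · simp only [hkey, if_pos, Bool.not_true, Bool.false_eq_true, if_false]
    set L := PySem.Dict.getD (PySem.Dict.mk spec_dict) "ignoreColumns" [] with hL
    set parts := (PySem.Str.split? column_name delimiter).getD [] with hparts
    rw [foldl_flag_eq_any]
    simp only [Bool.false_or, token_in_list_ignore_case, tilLoop_eq_any]
    apply Bool.eq_iff_iff.mpr
    simp only [List.any_eq_true, Bool.or_eq_true, Bool.and_eq_true, beq_iff_eq,
      PySem.Set.contains_eq_listContains, List.contains_eq_mem, decide_eq_true_eq,
      PySem.Set.mem_ofList, List.mem_map, List.mem_filter, Bool.not_eq_true',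
      isdisjoint_false_iff]
    constructor
    · rintro ⟨tok, htok, hcase⟩
      rcases hcase with ⟨hdel, heq⟩ | ⟨part, hpart, hpeq⟩
      · exact Or.inl ⟨tok, ⟨htok, hdel⟩, heq⟩
      · exact Or.inr ⟨PySem.Str.lower part, ⟨part, hpart, rfl⟩, ⟨tok, htok, hpeq.symm⟩⟩
    · rintro (⟨tok, ⟨htok, hdel⟩, heq⟩ | ⟨x, ⟨part, hpart, hx⟩, ⟨tok, htok, hteq⟩⟩)
      · exact ⟨tok, htok, Or.inl ⟨hdel, heq⟩⟩
      · exact ⟨tok, htok, Or.inr ⟨part, hpart, by rw [hx, hteq]⟩⟩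
  · simp [hkey]
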